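-- pv_equiv track=rewrite | github.com/jmetzz/sandbox-python | algorithms/src/strings/suffixes.py | compute_character_classes
-- ===== SOURCE A (Python) =====
-- from typing import Any, List
--
-- def compute_character_classes(text: str, order: List[int]) -> List[int]:
--     """
--     This algorithm run with complexity time: O(|text|)
--     :param text:
--     :param order:
--     :return:
--     """
--     classes = [0] * len(text)
--     classes[order[0]] = 0
--     for idx in range(1, len(text)):
--         previous_class = classes[order[idx - 1]]
--         if text[order[idx]] == text[order[idx - 1]]:
--             classes[order[idx]] = previous_class
--         else:
--             classes[order[idx]] = previous_class + 1
--
--     return classes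
-- ===== SOURCE B (Python) =====
-- def compute_character_classes(text, order):
--     n = len(text)
--     chars = [text[o] for o in order[:n]]
--     # run-segmentation: cut the reordered character sequence at each boundary,
--     # then label every position of the g-th maximal run with class g
--     bounds = [0] + [i for i in range(1, n) if chars[i] != chars[i - 1]] + [n]
--     classes = [0] * n
--     for g, (lo, hi) in enumerate(zip(bounds, bounds[1:])):
--         for i in range(lo, hi):
--             classes[order[i]] = g
--     return classes
-- ===== Notes on version B (the rewrite author's own statement) =====
-- stated objective: alternative
-- what changed: A makes one fused pass carrying the previous class read back out of the output array; B instead segments the reordered character sequence into maximal runs of equal characters (a boundary list) and then labels the positions of each run with the run's index via a nested scatter loop.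
import Mathlib
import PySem

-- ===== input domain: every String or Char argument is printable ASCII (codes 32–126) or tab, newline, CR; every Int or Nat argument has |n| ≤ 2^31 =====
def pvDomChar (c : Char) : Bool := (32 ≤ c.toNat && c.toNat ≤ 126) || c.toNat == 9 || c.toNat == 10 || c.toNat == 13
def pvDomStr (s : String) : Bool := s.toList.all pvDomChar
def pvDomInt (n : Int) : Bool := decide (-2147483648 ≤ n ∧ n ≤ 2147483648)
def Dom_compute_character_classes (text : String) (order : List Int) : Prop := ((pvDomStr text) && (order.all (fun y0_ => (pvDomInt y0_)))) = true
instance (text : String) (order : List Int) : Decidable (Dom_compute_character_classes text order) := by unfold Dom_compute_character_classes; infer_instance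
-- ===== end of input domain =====

-- B replaces A's fused pass (which reads the previous class back out of the output array)
-- by run segmentation: cut the reordered character sequence at each boundary, then label
-- each maximal run's positions with the run index ("alternative", same cost).

-- ===== PORT A =====
def compute_character_classes (text : String) (order : List Int) : List Int :=
  let cs := text.toList
  let classes : List Int := List.replicate cs.length 0
  let classes := PySem.List.pySetD classes (PySem.List.pyGetD order 0 0) 0
  (PySem.List.pyRange 1 cs.length 1).foldl
    (fun classes idx =>
      let previous_class := PySem.List.pyGetD classes (PySem.List.pyGetD order (idx - 1) 0) 0
      if PySem.List.pyGetD cs (PySem.List.pyGetD order idx 0) ' '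
           = PySem.List.pyGetD cs (PySem.List.pyGetD order (idx - 1) 0) ' '
      then PySem.List.pySetD classes (PySem.List.pyGetD order idx 0) previous_class
      else PySem.List.pySetD classes (PySem.List.pyGetD order idx 0) (previous_class + 1))
    classes

-- ===== PORT B =====
def compute_character_classes_alt (text : String) (order : List Int) : List Int :=
  let cs := text.toList
  let n := cs.length
  let chars := (PySem.List.slice order (some 0) (some (n : Int))).map
    (fun o => PySem.List.pyGetD cs o ' ')
  let bounds : List Int :=
    (0 : Int) :: ((PySem.List.pyRange 1 n 1).filter
      (fun i => PySem.List.pyGetD chars i ' ' ≠ PySem.List.pyGetD chars (i - 1) ' ')) ++ [(n : Int)]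
  let classes : List Int := List.replicate n 0
  (PySem.List.enumerate (List.zip bounds (PySem.List.slice bounds (some 1) none)) 0).foldl
    (fun classes gp =>
      (PySem.List.pyRange gp.2.1 gp.2.2 1).foldl
        (fun classes i => PySem.List.pySetD classes (PySem.List.pyGetD order i 0) gp.1)
        classes)
    classes

-- ===== PRECONDITION & SPEC =====
-- Pre_ excludes exactly the inputs on which the Python A raises IndexError (empty text,
-- order shorter than text, or an entry of order[:len(text)] that is no valid index into text).
def Pre_compute_character_classes (text : String) (order : List Int) : Prop :=
  0 < text.toList.length ∧ text.toList.length ≤ order.length ∧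
  ∀ i ∈ order.take text.toList.length, PySem.Raise.InRange text.toList.length i
instance (text : String) (order : List Int) : Decidable (Pre_compute_character_classes text order) := by
  unfold Pre_compute_character_classes; infer_instance
def pvWitness_compute_character_classes : String × List Int := ("ab", [1, 0])

def Spec_compute_character_classes (text : String) (order : List Int) (out : List Int) : Prop := out = compute_character_classes_alt text order
instance (text : String) (order : List Int) (out : List Int) : Decidable (Spec_compute_character_classes text order out) := by unfold Spec_compute_character_classes; infer_instance

-- ===== CLAIM (what is proved, stated in full; the proofs are below) =====
def Claim_equal_compute_character_classes : Prop := ∀ (text : String) (order : List Int), Dom_compute_character_classes text order → Pre_compute_character_classes text order → Spec_compute_character_classes text order (compute_character_classes text order)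

-- ===== LEMMAS AND PROOFS =====

-- the character at sorted position i, the boundary list, and the prefix-count of boundaries
def pvCh (cs : List Char) (order : List Int) (i : Int) : Char :=
  PySem.List.pyGetD cs (PySem.List.pyGetD order i 0) ' '
def pvBs (cs : List Char) (order : List Int) : List Int :=
  (PySem.List.pyRange 1 cs.length 1).filter (fun i => pvCh cs order i ≠ pvCh cs order (i - 1))
def pvPc (cs : List Char) (order : List Int) (i : Int) : Int :=
  (((pvBs cs order).filter (fun b => b ≤ i)).length : Int)
def pvStep (cs : List Char) (order : List Int) (acc : List Int) (i : Int) : List Int :=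
  PySem.List.pySetD acc (PySem.List.pyGetD order i 0) (pvPc cs order i)

theorem pyIdx_inrange {n : Nat} {i : Int} (h : PySem.Raise.InRange n i) :
    ∃ k, PySem.List.pyIdx? n i = some k ∧ k < n := by
  obtain ⟨h1, h2⟩ := h
  unfold PySem.List.pyIdx?
  split_ifs <;> exact ⟨_, rfl, by omega⟩

theorem getD_setD_self {xs : List Int} {i : Int} (v d : Int) (h : PySem.Raise.InRange xs.length i) :
    PySem.List.pyGetD (PySem.List.pySetD xs i v) i d = v := by
  obtain ⟨k, hk, hlt⟩ := pyIdx_inrange h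
  simp [PySem.List.pyGetD, PySem.List.pyGet?, PySem.List.pySetD, PySem.List.pySet?, hk,
        List.getElem?_set, hlt]

theorem mem_take_of_lt {order : List Int} {n k : Nat} (hk : k < n) (hko : k < order.length) :
    order[k] ∈ order.take n := by
  have h1 : k < (order.take n).length := by simp [List.length_take, hk, hko]
  have h2 := List.getElem_mem h1
  rwa [List.getElem_take] at h2

theorem filter_le_sub_one (l : List Int) (k : Int) :
    l.filter (fun b => b ≤ k - 1) = l.filter (fun b => b < k) := by
  apply List.filter_congr
  intro b _
  exact decide_eq_decide.mpr (by omega)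

theorem count_filter_le_succ (l : List Int) (k : Int) :
    (l.filter (fun b => b ≤ k)).length = (l.filter (fun b => b ≤ k - 1)).length + l.count k := by
  rw [filter_le_sub_one]
  induction l with
  | nil => simp
  | cons x xs ih =>
    simp only [List.filter_cons, List.count_cons]
    by_cases h1 : x ≤ k <;> by_cases h2 : x < k <;> by_cases h3 : x = k <;>
      simp [h1, h2, h3, ih] <;> omega

theorem mem_pvBs {cs : List Char} {order : List Int} {b : Int} :
    b ∈ pvBs cs order ↔ (1 ≤ b ∧ b < (cs.length : Int)) ∧ pvCh cs order b ≠ pvCh cs order (b - 1) := by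
  simp [pvBs, List.mem_filter, PySem.List.mem_pyRange_one]

theorem pvPc_zero_le {cs : List Char} {order : List Int} {i : Int} (h : i ≤ 0) :
    pvPc cs order i = 0 := by
  unfold pvPc
  have : (pvBs cs order).filter (fun b => b ≤ i) = [] := by
    apply List.filter_eq_nil_iff.mpr
    intro b hb
    have := (mem_pvBs.mp hb).1.1
    simp; omega
  simp [this]

theorem pvPc_step {cs : List Char} {order : List Int} {k : Int}
    (h1 : 1 ≤ k) (h2 : k < (cs.length : Int)) :
    pvPc cs order k
      = pvPc cs order (k - 1) + (if pvCh cs order k ≠ pvCh cs order (k - 1) then 1 else 0) := by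
  unfold pvPc
  have hcnt := count_filter_le_succ (pvBs cs order) k
  have hnd : (pvBs cs order).Nodup := (PySem.List.nodup_pyRange_one 1 cs.length).filter _
  by_cases hb : pvCh cs order k ≠ pvCh cs order (k - 1)
  · have hmem : k ∈ pvBs cs order := mem_pvBs.mpr ⟨⟨h1, h2⟩, hb⟩
    have : (pvBs cs order).count k = 1 := List.count_eq_one_of_mem hnd hmem
    rw [if_pos hb]
    omega
  · have hmem : k ∉ pvBs cs order := fun h => hb (mem_pvBs.mp h).2
    have : (pvBs cs order).count k = 0 := List.count_eq_zero_of_not_mem hmem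
    rw [if_neg hb]
    omega

-- ===== A-side: A's fused loop is the scatter of prefix-counts =====
theorem loopA (cs : List Char) (order : List Int)
    (hlen : cs.length ≤ order.length)
    (hidx : ∀ i ∈ order.take cs.length, PySem.Raise.InRange cs.length i) :
    ∀ (m k : Nat), 1 ≤ k → k + m = cs.length →
    ∀ (classes : List Int), classes.length = cs.length →
      PySem.List.pyGetD classes (PySem.List.pyGetD order ((k : Int) - 1) 0) 0
        = pvPc cs order ((k : Int) - 1) →
      (PySem.List.pyRange k cs.length 1).foldl
        (fun classes idx =>
          if PySem.List.pyGetD cs (PySem.List.pyGetD order idx 0) ' '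
               = PySem.List.pyGetD cs (PySem.List.pyGetD order (idx - 1) 0) ' '
          then PySem.List.pySetD classes (PySem.List.pyGetD order idx 0)
                 (PySem.List.pyGetD classes (PySem.List.pyGetD order (idx - 1) 0) 0)
          else PySem.List.pySetD classes (PySem.List.pyGetD order idx 0)
                 (PySem.List.pyGetD classes (PySem.List.pyGetD order (idx - 1) 0) 0 + 1))
        classes
      = (PySem.List.pyRange k cs.length 1).foldl (pvStep cs order) classes := by
  intro m
  induction m with
  | zero =>
    intro k hk1 hkn classes hcl hinv
    rw [PySem.List.pyRange_one_eq_nil (by omega)]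
    simp
  | succ m ih =>
    intro k hk1 hkn classes hcl hinv
    have hklt : (k : Int) < (cs.length : Int) := by omega
    rw [PySem.List.pyRange_one_cons hklt]
    simp only [List.foldl_cons]
    have hkcs : k < cs.length := by omega
    have hko : k < order.length := lt_of_lt_of_le hkcs hlen
    have hgetk : PySem.List.pyGetD order (k : Int) 0 = order[k] := by
      rw [PySem.List.pyGetD_natCast]
      exact List.getD_eq_getElem order 0 hko
    have hink : PySem.Raise.InRange cs.length (PySem.List.pyGetD order (k : Int) 0) := by
      rw [hgetk]; exact hidx _ (mem_take_of_lt hkcs hko)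
    have hpck := pvPc_step (cs := cs) (order := order) (k := (k : Int)) (by omega) hklt
    have hstep :
        (if PySem.List.pyGetD cs (PySem.List.pyGetD order (k : Int) 0) ' '
             = PySem.List.pyGetD cs (PySem.List.pyGetD order ((k : Int) - 1) 0) ' '
         then PySem.List.pySetD classes (PySem.List.pyGetD order (k : Int) 0)
                (PySem.List.pyGetD classes (PySem.List.pyGetD order ((k : Int) - 1) 0) 0)
         else PySem.List.pySetD classes (PySem.List.pyGetD order (k : Int) 0)
                (PySem.List.pyGetD classes (PySem.List.pyGetD order ((k : Int) - 1) 0) 0 + 1))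
        = pvStep cs order classes (k : Int) := by
      unfold pvStep
      rw [hinv]
      by_cases heq : pvCh cs order (k : Int) = pvCh cs order ((k : Int) - 1)
      · have : pvPc cs order (k : Int) = pvPc cs order ((k : Int) - 1) := by
          rw [hpck, if_neg (by simpa using heq)]; ring
        rw [this]
        exact if_pos heq
      · have : pvPc cs order (k : Int) = pvPc cs order ((k : Int) - 1) + 1 := by
          rw [hpck, if_pos heq]
        rw [this]
        exact if_neg heq
    simp only [] at hstep ⊢
    rw [hstep]
    have hcl' : (pvStep cs order classes (k : Int)).length = cs.length := by
      unfold pvStep; rw [PySem.List.length_pySetD, hcl]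
    have hinv' :
        PySem.List.pyGetD (pvStep cs order classes (k : Int))
          (PySem.List.pyGetD order (((k + 1 : Nat) : Int) - 1) 0) 0
        = pvPc cs order (((k + 1 : Nat) : Int) - 1) := by
      have hc : ((k + 1 : Nat) : Int) - 1 = (k : Int) := by push_cast; ring
      rw [hc]
      unfold pvStep
      exact getD_setD_self _ 0 (by rw [hcl]; exact hink)
    have := ih (k + 1) (by omega) (by omega) (pvStep cs order classes (k : Int)) hcl' hinv'
    have hc : ((k + 1 : Nat) : Int) = (k : Int) + 1 := by push_cast; ring
    rw [hc] at this
    exact this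

-- ===== B-side: the run-segmentation nested loop is the same scatter =====
theorem loopB (cs : List Char) (order : List Int) :
    ∀ (bs : List Int) (g lo : Int) (acc : List Int),
      (∀ b ∈ bs, lo < b ∧ b < (cs.length : Int)) →
      bs.Pairwise (· < ·) →
      lo ≤ (cs.length : Int) →
      (∀ i : Int, lo ≤ i → i < (cs.length : Int) →
        pvPc cs order i = g + ((bs.filter (fun b => b ≤ i)).length : Int)) →
      (PySem.List.enumerate
          (List.zip (lo :: bs ++ [(cs.length : Int)]) (bs ++ [(cs.length : Int)])) g).foldl
        (fun classes gp =>
          (PySem.List.pyRange gp.2.1 gp.2.2 1).foldl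
            (fun classes i => PySem.List.pySetD classes (PySem.List.pyGetD order i 0) gp.1)
            classes)
        acc
      = (PySem.List.pyRange lo (cs.length : Int) 1).foldl (pvStep cs order) acc := by
  intro bs
  induction bs with
  | nil =>
    intro g lo acc _ _ hlo hpc
    have hred : PySem.List.enumerate
        (List.zip (lo :: [] ++ [(cs.length : Int)]) ([] ++ [(cs.length : Int)])) g
        = [(g, (lo, (cs.length : Int)))] := rfl
    rw [hred]
    simp only [List.foldl_cons, List.foldl_nil]
    apply PySem.List.foldl_congr_mem
    intro acc' i hi
    have hm := (PySem.List.mem_pyRange_one).mp hi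
    unfold pvStep
    rw [hpc i hm.1 hm.2]
    simp
  | cons b bs ih =>
    intro g lo acc hmem hsort hlo hpc
    obtain ⟨hlb, hbn⟩ := hmem b List.mem_cons_self
    have hsort' := (List.pairwise_cons.mp hsort).2
    have hgtb := (List.pairwise_cons.mp hsort).1
    simp only [List.cons_append, List.zip_cons_cons, PySem.List.enumerate_cons, List.foldl_cons]
    have hfirst : ∀ acc',
        (PySem.List.pyRange lo b 1).foldl
          (fun classes i => PySem.List.pySetD classes (PySem.List.pyGetD order i 0) g) acc'
        = (PySem.List.pyRange lo b 1).foldl (pvStep cs order) acc' := by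
      intro acc'
      apply PySem.List.foldl_congr_mem
      intro acc'' i hi
      have hm := (PySem.List.mem_pyRange_one).mp hi
      have hpci : pvPc cs order i = g := by
        rw [hpc i hm.1 (by omega)]
        have : (b :: bs).filter (fun x => x ≤ i) = [] := by
          apply List.filter_eq_nil_iff.mpr
          intro x hx
          rcases List.mem_cons.mp hx with rfl | hx'
          · simp; omega
          · have := hgtb x hx'; simp; omega
        simp [this]
      unfold pvStep
      rw [hpci]
    rw [hfirst]
    have hpc' : ∀ i : Int, b ≤ i → i < (cs.length : Int) →
        pvPc cs order i = (g + 1) + ((bs.filter (fun x => x ≤ i)).length : Int) := by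
      intro i hbi hin
      rw [hpc i (by omega) hin]
      have : (b :: bs).filter (fun x => x ≤ i) = b :: bs.filter (fun x => x ≤ i) := by
        simp [hbi]
      rw [this]
      simp
      ring
    have := ih (g + 1) b ((PySem.List.pyRange lo b 1).foldl (pvStep cs order) acc)
      (fun x hx => ⟨hgtb x hx, (hmem x (List.mem_cons_of_mem b hx)).2⟩) hsort' (by omega) hpc'
    rw [PySem.List.pyRange_one_append lo b (cs.length : Int) (by omega) (by omega),
        List.foldl_append]
    exact this

-- B's chars-based boundary list is pvBs, under Pre_
theorem chars_getD_eq (cs : List Char) (order : List Int)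
    (hlen : cs.length ≤ order.length) {i : Int} (h0 : 0 ≤ i) (hn : i < (cs.length : Int)) :
    PySem.List.pyGetD
      ((PySem.List.slice order (some 0) (some (cs.length : Int))).map
        (fun o => PySem.List.pyGetD cs o ' ')) i ' '
    = pvCh cs order i := by
  have hsl : PySem.List.slice order (some (0 : Int)) (some ((cs.length : Nat) : Int))
      = order.take cs.length := by
    rw [PySem.List.slice_zero_start, PySem.List.slice_to_natCast]
  rw [hsl]
  have hi2 : i.toNat < order.length := by omega
  have hmaplen : (((order.take cs.length).map (fun o => PySem.List.pyGetD cs o ' ')).length : Int)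
      = min (cs.length : Int) (order.length : Int) := by
    rw [List.length_map, List.length_take]; push_cast [Nat.cast_min]; rfl
  rw [PySem.List.pyGetD_eq_getElem _ _ h0 (by omega)]
  rw [List.getElem_map, List.getElem_take]
  unfold pvCh
  congr 1
  rw [PySem.List.pyGetD_eq_getElem _ _ h0 (by omega)]

-- ===== VERDICT (by name: the statement is the Claim_ definition above) =====
theorem compute_character_classes_spec : Claim_equal_compute_character_classes := by
  intro text order _hdom hpre
  obtain ⟨hpos, hlen, hidx⟩ := hpre
  unfold Spec_compute_character_classes compute_character_classes compute_character_classes_alt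
  simp only []
  set cs := text.toList with hcs
  -- B's boundary filter is pvBs
  have hfilter : (PySem.List.pyRange 1 cs.length 1).filter
      (fun i => PySem.List.pyGetD
          ((PySem.List.slice order (some 0) (some (cs.length : Int))).map
            (fun o => PySem.List.pyGetD cs o ' ')) i ' '
        ≠ PySem.List.pyGetD
          ((PySem.List.slice order (some 0) (some (cs.length : Int))).map
            (fun o => PySem.List.pyGetD cs o ' ')) (i - 1) ' ')
      = pvBs cs order := by
    unfold pvBs
    apply List.filter_congr
    intro i hi
    have hm := (PySem.List.mem_pyRange_one).mp hi
    rw [chars_getD_eq cs order hlen (by omega) hm.2,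
        chars_getD_eq cs order hlen (by omega) (by omega)]
  rw [hfilter]
  -- B = scatter over [0, n)
  have hB := loopB cs order (pvBs cs order) 0 0 (List.replicate cs.length 0)
    (fun b hb => by
      have := (mem_pvBs.mp hb).1
      exact ⟨by omega, this.2⟩)
    ((PySem.List.pairwise_lt_pyRange_one 1 cs.length).filter _)
    (by omega)
    (fun i _ _ => by unfold pvPc; ring)
  -- A = scatter over [0, n)
  have h0o : 0 < order.length := lt_of_lt_of_le hpos hlen
  have hget0 : PySem.List.pyGetD order (0 : Int) 0 = order[0] := by
    rw [PySem.List.pyGetD_zero]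
    exact List.getD_eq_getElem order 0 h0o
  have hin0 : PySem.Raise.InRange cs.length (PySem.List.pyGetD order (0 : Int) 0) := by
    rw [hget0]
    exact hidx _ (mem_take_of_lt hpos h0o)
  have hinit : PySem.List.pySetD (List.replicate cs.length (0 : Int))
      (PySem.List.pyGetD order 0 0) 0
      = pvStep cs order (List.replicate cs.length 0) 0 := by
    unfold pvStep
    rw [pvPc_zero_le (le_refl 0)]
  have hA := loopA cs order hlen hidx (cs.length - 1) 1 (by omega) (by omega)
    (pvStep cs order (List.replicate cs.length 0) 0)
    (by unfold pvStep; rw [PySem.List.length_pySetD, List.length_replicate])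
    (by
      have hc : ((1 : Nat) : Int) - 1 = (0 : Int) := by norm_num
      rw [hc, pvPc_zero_le (le_refl 0)]
      unfold pvStep
      rw [pvPc_zero_le (le_refl 0)]
      exact getD_setD_self 0 0 (by rw [List.length_replicate]; exact hin0))
  have hone : ((1 : Nat) : Int) = (1 : Int) := by norm_num
  rw [hone] at hA
  have htail : PySem.List.slice ((0 : Int) :: pvBs cs order ++ [(cs.length : Int)]) (some 1) none
      = pvBs cs order ++ [(cs.length : Int)] := by
    rw [PySem.List.slice_from_one]
    rfl
  rw [hinit, hA, htail, hB]
  have hsplit : PySem.List.pyRange 0 (cs.length : Int) 1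
      = PySem.List.pyRange 0 1 1 ++ PySem.List.pyRange 1 (cs.length : Int) 1 :=
    PySem.List.pyRange_one_append 0 1 (cs.length : Int) (by omega) (by omega)
  have h01 : PySem.List.pyRange (0 : Int) 1 1 = [0] := PySem.List.pyRange_one_singleton 0
  rw [hsplit, h01, List.foldl_append, List.foldl_cons, List.foldl_nil]
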